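-- pv_equiv track=rewrite | github.com/Traxes/zeno | src/avd/core/sliceEngine/graph.py | set_equivalence
-- ===== SOURCE A (Python) =====
-- import copy
--
-- def set_equivalence (sets) :
--     '''
--     Takes a list of lists, and returns True if all lists are equivalent, False
--     otherwise.
--     '''
--     # An empty set is equivalent
--     if len(sets) < 0 :
--         return True
--     # Sets of differing length are obviously not equivalent
--     l = len(sets[0])
--     for s in sets :
--         if len(s) != l :
--             return False
--
--     sets_copy = copy.deepcopy(sets)
--     for i in range(len(sets_copy)) :
--         sets_copy[i].sort()
--
--     for i in range(len(sets_copy[0])) :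
--         for j in range(len(sets_copy)) :
--             if sets_copy[0][i] != sets_copy[j][i] :
--                 return False
--
--     return True
-- ===== SOURCE B (Python) =====
-- def set_equivalence(sets):
--     '''
--     Takes a list of lists, and returns True if all lists are equivalent, False
--     otherwise.
--     '''
--     # Compare frequency tables instead of sorted copies.
--     def counts(xs):
--         c = {}
--         for x in xs:
--             c[x] = c.get(x, 0) + 1
--         return c
--     ref = counts(sets[0])
--     for s in sets:
--         if counts(s) != ref:
--             return False
--     return True
-- ===== Notes on version B (the rewrite author's own statement) =====
-- stated objective: alternative
-- what changed: Replaces deepcopy + per-list sorting + positional comparison with a frequency table (dict of counts) built per list and compared against the first list's table.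
import Mathlib
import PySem

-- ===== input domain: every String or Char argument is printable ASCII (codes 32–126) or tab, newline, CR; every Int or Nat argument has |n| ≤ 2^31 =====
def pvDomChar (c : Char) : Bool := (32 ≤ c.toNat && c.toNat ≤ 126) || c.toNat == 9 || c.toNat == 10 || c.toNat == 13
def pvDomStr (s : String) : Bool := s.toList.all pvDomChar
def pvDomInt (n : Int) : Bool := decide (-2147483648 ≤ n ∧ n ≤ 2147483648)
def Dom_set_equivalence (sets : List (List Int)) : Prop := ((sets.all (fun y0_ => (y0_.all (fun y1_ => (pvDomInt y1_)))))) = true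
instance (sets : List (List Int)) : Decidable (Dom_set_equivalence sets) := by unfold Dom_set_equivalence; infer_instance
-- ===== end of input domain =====

-- B replaces deepcopy + per-list sorting + positional comparison with per-list frequency
-- tables compared against the first list's table (alternative algorithm, similar cost).

-- ===== PORT A =====
def set_equivalence (sets : List (List Int)) : Bool :=
  -- 'if len(sets) < 0: return True' — dead branch, kept literally
  if sets.length < 0 then true
  else
    -- sets[0]: Pre_ excludes sets = [] (IndexError in Python)
    let l := (sets.headD []).length
    if sets.any (fun s => decide (s.length ≠ l)) then false
    else
      let setsCopy := sets.map (fun s => PySem.List.sorted s (fun x => x) false)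
      let s0 := setsCopy.headD []
      if (List.range s0.length).any (fun i =>
           setsCopy.any (fun sj => decide (s0.getD i 0 ≠ sj.getD i 0))) then false
      else true

-- ===== PORT B =====
def pvCounts (xs : List Int) : PySem.Dict Int Int :=
  xs.foldl (fun d x => d.insert x (d.getD x 0 + 1)) PySem.Dict.empty

-- hand port of Python's dict '==' (order-insensitive); exact on count dicts, whose values are never 0
def pvDictEq (d e : PySem.Dict Int Int) : Bool :=
  d.items.all (fun kv => e.getD kv.1 0 == kv.2) && e.items.all (fun kv => d.getD kv.1 0 == kv.2)

def set_equivalence_alt (sets : List (List Int)) : Bool :=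
  let ref := pvCounts (sets.headD [])   -- sets[0]; Pre_ excludes sets = []
  sets.all (fun s => pvDictEq (pvCounts s) ref)

-- ===== PRECONDITION & SPEC =====
-- Pre_ excludes the empty list, on which Python A (and B) raise IndexError at sets[0]
def Pre_set_equivalence (sets : List (List Int)) : Prop := sets ≠ []
instance (sets : List (List Int)) : Decidable (Pre_set_equivalence sets) := by unfold Pre_set_equivalence; infer_instance
def pvWitness_set_equivalence : List (List Int) := [[1, 2], [2, 1]]

def Spec_set_equivalence (sets : List (List Int)) (out : Bool) : Prop := out = set_equivalence_alt sets
instance (sets : List (List Int)) (out : Bool) : Decidable (Spec_set_equivalence sets out) := by unfold Spec_set_equivalence; infer_instance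

-- ===== CLAIM (what is proved, stated in full; the proofs are below) =====
def Claim_equal_set_equivalence : Prop := ∀ (sets : List (List Int)), Dom_set_equivalence sets → Pre_set_equivalence sets → Spec_set_equivalence sets (set_equivalence sets)

-- ===== LEMMAS AND PROOFS =====

theorem pvDictEq_counter_iff (s t : List Int) :
    pvDictEq (pvCounts s) (pvCounts t) = true ↔ ∀ k : Int, s.count k = t.count k := by
  unfold pvCounts pvDictEq
  rw [PySem.Dict.foldl_insert_getD_add_one_eq_counter, PySem.Dict.foldl_insert_getD_add_one_eq_counter]
  simp [PySem.Dict.items_counter, PySem.Dict.getD_counter, List.all_eq_true, PySem.Set.mem_ofList]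
  constructor
  · rintro ⟨h1, h2⟩ k
    by_cases hs : k ∈ s
    · have := h1 k hs; omega
    · by_cases ht : k ∈ t
      · have := h2 k ht; omega
      · simp [List.count_eq_zero_of_not_mem, hs, ht]
  · intro h
    exact ⟨fun k _ => by have := h k; omega, fun k _ => by have := h k; omega⟩

theorem alt_iff (h : List Int) (t : List (List Int)) :
    set_equivalence_alt (h :: t) = true ↔ ∀ s ∈ h :: t, s.Perm h := by
  simp only [set_equivalence_alt, List.headD_cons, List.all_eq_true, pvDictEq_counter_iff,
    ← List.perm_iff_count]

theorem a_iff (h : List Int) (t : List (List Int)) :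
    set_equivalence (h :: t) = true ↔ ∀ s ∈ h :: t, s.Perm h := by
  unfold set_equivalence
  simp only [List.headD_cons, List.map_cons, Nat.not_lt_zero, if_false, List.length_cons]
  split_ifs with h1 h2
  · simp only [false_iff]
    intro hall
    rcases List.any_eq_true.mp h1 with ⟨s, hs, hne⟩
    have : s.length = h.length := (hall s hs).length_eq
    simp [this] at hne
  · simp only [false_iff]
    intro hall
    rcases List.any_eq_true.mp h2 with ⟨i, _, hinner⟩
    rcases List.any_eq_true.mp hinner with ⟨sj, hsj, hne⟩
    have hsj' : ∃ s ∈ h :: t, PySem.List.sorted s (fun x => x) false = sj := by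
      rcases List.mem_cons.mp hsj with rfl | hm
      · exact ⟨h, by simp, rfl⟩
      · rcases List.mem_map.mp hm with ⟨s, hs, rfl⟩
        exact ⟨s, by simp [hs], rfl⟩
    rcases hsj' with ⟨s, hs, rfl⟩
    have : PySem.List.sorted s (fun x => x) false = PySem.List.sorted h (fun x => x) false :=
      (PySem.List.sorted_id_eq_sorted_id_iff_perm _ _).mpr (hall s hs)
    rw [this] at hne
    simp at hne
  · simp only [true_iff]
    intro s hs
    have hslen : s.length = h.length := by
      by_contra hne
      exact h1 (List.any_eq_true.mpr ⟨s, hs, by simpa using hne⟩)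
    apply (PySem.List.sorted_id_eq_sorted_id_iff_perm _ _).mp
    apply List.ext_getElem
    · simp [PySem.List.length_sorted, hslen]
    · intro i hi1 hi2
      by_contra hnei
      apply h2
      apply List.any_eq_true.mpr
      refine ⟨i, List.mem_range.mpr hi2, List.any_eq_true.mpr ?_⟩
      have hsmem : PySem.List.sorted s (fun x => x) false ∈
          (PySem.List.sorted h (fun x => x) false) ::
            List.map (fun s => PySem.List.sorted s (fun x => x) false) t := by
      -- s is h itself or in t
        rcases List.mem_cons.mp hs with rfl | hm
        · exact List.mem_cons_self
        · exact List.mem_cons_of_mem _ (List.mem_map.mpr ⟨s, hm, rfl⟩)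
      refine ⟨_, hsmem, ?_⟩
      simp only [List.getD_eq_getElem _ _ hi2, List.getD_eq_getElem _ _ hi1, decide_eq_true_eq]
      exact fun e => hnei e.symm

-- ===== VERDICT (by name: the statement is the Claim_ definition above) =====
theorem set_equivalence_spec : Claim_equal_set_equivalence := by
  intro sets _ hpre
  unfold Spec_set_equivalence
  match sets, hpre with
  | h :: t, _ =>
    rw [Bool.eq_iff_iff, a_iff, alt_iff]
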